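-- pv_equiv track=rewrite | github.com/maephae/Motin | caley_v2.py | generate_dihedral_table
-- ===== SOURCE A (Python) =====
-- def generate_dihedral_table(n):
--     order = 2 * n
--     table = [[0] * order for _ in range(order)]
--     labels = [f"r{i}s{j}" for j in range(2) for i in range(n)]
--     for idx1 in range(order):
--         for idx2 in range(order):
--             i1, j1 = idx1 % n, idx1 // n
--             i2, j2 = idx2 % n, idx2 // n
--             new_i = (i1 + i2) % n if j1 == 0 else (i1 - i2) % n
--             new_j = (j1 + j2) % 2
--             table[idx1][idx2] = new_i + (new_j * n)
--     return table, labels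
-- ===== SOURCE B (Python) =====
-- def generate_dihedral_table(n):
--     # rows built by slicing/rotating a base list instead of a nested modular loop
--     base = list(range(n))
--     rows = []
--     for i in range(n):                      # rotation rows r^i
--         rot = base[i:] + base[:i]
--         rows.append(rot + [x + n for x in rot])
--     for i in range(n):                      # reflection rows r^i s
--         k = (i + 1) % n
--         rev = (base[k:] + base[:k])[::-1]
--         rows.append([x + n for x in rev] + rev)
--     labels = [f"r{i}s{j}" for j in range(2) for i in range(n)]
--     return rows, labels
-- ===== Notes on version B (the rewrite author's own statement) =====
-- stated objective: alternative
-- what changed: Replaces the 2n x 2n nested loop of per-entry modular index arithmetic by constructing each row at once as a slice-rotation (and reversal, for reflections) of a base list, exploiting that each group element's row is a rotated/reflected copy of the identity row.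
import Mathlib
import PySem

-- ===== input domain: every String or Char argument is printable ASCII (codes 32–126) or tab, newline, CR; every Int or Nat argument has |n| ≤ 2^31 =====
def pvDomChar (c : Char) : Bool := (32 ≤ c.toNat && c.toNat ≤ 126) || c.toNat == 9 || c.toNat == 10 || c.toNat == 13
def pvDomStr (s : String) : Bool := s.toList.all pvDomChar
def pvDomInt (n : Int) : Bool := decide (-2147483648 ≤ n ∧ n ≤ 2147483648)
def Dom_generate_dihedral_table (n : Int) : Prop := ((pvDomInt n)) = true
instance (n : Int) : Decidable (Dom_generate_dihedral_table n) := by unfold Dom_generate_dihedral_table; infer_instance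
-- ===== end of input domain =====

-- B builds each Cayley-table row at once as a slice-rotation/reversal of a base list instead of A's nested per-entry modular loop.


-- ===== PORT A =====
def generate_dihedral_table (n : Int) : List (List Int) × List String :=
  let order := 2 * n
  -- [[0] * order for _ in range(order)]  ([0]*k is k copies; negative k gives [])
  let table : List (List Int) :=
    (PySem.List.pyRange 0 order 1).map (fun _ => List.replicate order.toNat 0)
  let labels : List String := (PySem.List.pyRange 0 2 1).flatMap
    (fun j => (PySem.List.pyRange 0 n 1).map
      (fun i => "r" ++ PySem.Int.toStr i ++ "s" ++ PySem.Int.toStr j))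
  let table := (PySem.List.pyRange 0 order 1).foldl (fun table idx1 =>
    (PySem.List.pyRange 0 order 1).foldl (fun table idx2 =>
      let i1 := PySem.Int.mod idx1 n
      let j1 := PySem.Int.floordiv idx1 n
      let i2 := PySem.Int.mod idx2 n
      let j2 := PySem.Int.floordiv idx2 n
      let new_i := if j1 = 0 then PySem.Int.mod (i1 + i2) n else PySem.Int.mod (i1 - i2) n
      let new_j := PySem.Int.mod (j1 + j2) 2
      -- table[idx1][idx2] = v  (row read, updated, written back; indices always in range here)
      PySem.List.pySetD table idx1
        (PySem.List.pySetD (PySem.List.pyGetD table idx1 []) idx2 (new_i + new_j * n))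
    ) table) table
  (table, labels)

-- ===== PORT B =====
def generate_dihedral_table_alt (n : Int) : List (List Int) × List String :=
  let base := PySem.List.pyRange 0 n 1
  let rows1 := (PySem.List.pyRange 0 n 1).foldl (fun rows i =>
    let rot := PySem.List.slice base (some i) none ++ PySem.List.slice base none (some i)
    rows ++ [rot ++ rot.map (fun x => x + n)]) []
  let rows := (PySem.List.pyRange 0 n 1).foldl (fun rows i =>
    let k := PySem.Int.mod (i + 1) n
    -- [::-1] is reverse (PySem.List.slice?_none_none_neg_one)
    let rev := (PySem.List.slice base (some k) none ++ PySem.List.slice base none (some k)).reverse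
    rows ++ [rev.map (fun x => x + n) ++ rev]) rows1
  let labels : List String := (PySem.List.pyRange 0 2 1).flatMap
    (fun j => (PySem.List.pyRange 0 n 1).map
      (fun i => "r" ++ PySem.Int.toStr i ++ "s" ++ PySem.Int.toStr j))
  (rows, labels)

-- ===== PRECONDITION & SPEC =====
def Spec_generate_dihedral_table (n : Int) (out : List (List Int) × List String) : Prop := out = generate_dihedral_table_alt n
instance (n : Int) (out : List (List Int) × List String) : Decidable (Spec_generate_dihedral_table n out) := by unfold Spec_generate_dihedral_table; infer_instance

-- ===== CLAIM (what is proved, stated in full; the proofs are below) =====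
def Claim_equal_generate_dihedral_table : Prop := ∀ (n : Int), Dom_generate_dihedral_table n → Spec_generate_dihedral_table n (generate_dihedral_table n)

-- ===== LEMMAS AND PROOFS =====

-- A's per-entry formula (the zeta-reduced body of A's inner loop)
def pvG (n a b : Int) : Int :=
  (if PySem.Int.floordiv a n = 0
    then PySem.Int.mod (PySem.Int.mod a n + PySem.Int.mod b n) n
    else PySem.Int.mod (PySem.Int.mod a n - PySem.Int.mod b n) n)
  + PySem.Int.mod (PySem.Int.floordiv a n + PySem.Int.floordiv b n) 2 * n


theorem pv_take_set (l : List Int) (a : Nat) (v : Int) (h : a < l.length) :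
    (l.set a v).take (a+1) = l.take a ++ [v] := by
  apply List.ext_getElem
  · simp; omega
  · intro i h1 h2
    simp only [List.getElem_take, List.getElem_set]
    rcases Nat.lt_or_ge i a with hlt | hge
    · rw [List.getElem_append_left (by simp; omega)]
      simp [Nat.ne_of_lt' hlt, List.getElem_take]
    · have hia : i = a := by simp at h1; omega
      subst hia
      rw [List.getElem_append_right (by simp)]
      simp

theorem pv_take_set' (l : List (List Int)) (a : Nat) (v : List Int) (h : a < l.length) :
    (l.set a v).take (a+1) = l.take a ++ [v] := by
  apply List.ext_getElem
  · simp; omega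
  · intro i h1 h2
    simp only [List.getElem_take, List.getElem_set]
    rcases Nat.lt_or_ge i a with hlt | hge
    · rw [List.getElem_append_left (by simp; omega)]
      simp [Nat.ne_of_lt' hlt, List.getElem_take]
    · have hia : i = a := by simp at h1; omega
      subst hia
      rw [List.getElem_append_right (by simp)]
      simp

theorem pv_extract (f : Int → Int) (js : List Int) : ∀ (a : Nat) (t : List (List Int)), a < t.length →
    js.foldl (fun t j => PySem.List.pySetD t (a:Int)
        (PySem.List.pySetD (PySem.List.pyGetD t (a:Int) []) j (f j))) t
      = PySem.List.pySetD t (a:Int)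
          (js.foldl (fun r j => PySem.List.pySetD r j (f j)) (PySem.List.pyGetD t (a:Int) [])) := by
  induction js with
  | nil =>
    intro a t ha
    simp only [List.foldl_nil, PySem.List.pySetD_natCast, PySem.List.pyGetD_natCast]
    rw [List.getD_eq_getElem _ _ ha, List.set_getElem_self]
  | cons j js ih =>
    intro a t ha
    simp only [List.foldl_cons]
    rw [ih a _ (by simp [PySem.List.pySetD_natCast] at *; omega)]
    rw [PySem.List.pyGetD_pySetD_natCast]
    · simp [PySem.List.pySetD_natCast, List.set_set]
    · simpa using ha

theorem pv_fill (f : Int → Int) (m : Nat) : ∀ (k a : Nat) (row : List Int), a + k = m → row.length = m →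
    (PySem.List.pyRange (a:Int) (m:Int) 1).foldl (fun r j => PySem.List.pySetD r j (f j)) row
      = row.take a ++ (List.range k).map (fun t : Nat => f ((a:Int) + (t:Int))) := by
  intro k
  induction k with
  | zero =>
    intro a row hk hl
    rw [PySem.List.pyRange_one_eq_nil (by exact_mod_cast (by omega : m ≤ a))]
    simp [List.take_of_length_le (by omega : row.length ≤ a)]
  | succ k ih =>
    intro a row hk hl
    rw [PySem.List.pyRange_one_cons (by exact_mod_cast (by omega : a < m))]
    simp only [List.foldl_cons, PySem.List.pySetD_natCast]
    rw [show ((a:Int)+1) = ((a+1:Nat):Int) by push_cast; ring]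
    rw [ih (a+1) _ (by omega) (by simp [hl])]
    rw [pv_take_set _ _ _ (by omega), List.range_succ_eq_map, List.map_cons, List.map_map]
    simp only [List.append_assoc, List.singleton_append]
    congr 1
    simp
    intro t _
    congr 1
    ring

theorem pv_outer (f : Int → Int → Int) (m : Nat) : ∀ (k a : Nat) (tb : List (List Int)),
    a + k = m → tb.length = m → (∀ r ∈ tb, r.length = m) →
    (PySem.List.pyRange (a:Int) (m:Int) 1).foldl
      (fun table idx1 => (PySem.List.pyRange 0 (m:Int) 1).foldl
        (fun table idx2 => PySem.List.pySetD table idx1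
          (PySem.List.pySetD (PySem.List.pyGetD table idx1 []) idx2 (f idx1 idx2))) table) tb
    = tb.take a ++ (List.range k).map
        (fun s : Nat => (List.range m).map (fun b : Nat => f ((a:Int)+(s:Int)) ((b:Int)))) := by
  intro k
  induction k with
  | zero =>
    intro a tb hk hl _
    rw [show PySem.List.pyRange (a:Int) (m:Int) 1 = []
        from PySem.List.pyRange_one_eq_nil (by exact_mod_cast (by omega : m ≤ a))]
    simp [List.take_of_length_le (by omega : tb.length ≤ a)]
  | succ k ih =>
    intro a tb hk hl hrows
    rw [show PySem.List.pyRange (a:Int) (m:Int) 1 = (a:Int) :: PySem.List.pyRange ((a:Int)+1) (m:Int) 1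
        from PySem.List.pyRange_one_cons (by exact_mod_cast (by omega : a < m))]
    simp only [List.foldl_cons]
    rw [pv_extract (f (a:Int)) _ a tb (by omega)]
    have hrow : (PySem.List.pyGetD tb (a:Int) []).length = m := by
      rw [PySem.List.pyGetD_natCast, List.getD_eq_getElem _ _ (by omega)]
      exact hrows _ (List.getElem_mem _)
    have hf := pv_fill (f (a:Int)) m m 0 (PySem.List.pyGetD tb (a:Int) []) (by omega) hrow
    rw [Nat.cast_zero] at hf
    rw [hf]
    simp only [List.take_zero, List.nil_append, zero_add, PySem.List.pySetD_natCast]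
    rw [show ((a:Int)+1) = ((a+1:Nat):Int) by push_cast; ring]
    rw [ih (a+1) _ (by omega) (by simpa using hl)
      (by intro r hr
          rcases List.mem_or_eq_of_mem_set hr with h | h
          · exact hrows r h
          · simp [h])]
    rw [pv_take_set' _ _ _ (by omega), List.range_succ_eq_map, List.map_cons, List.map_map]
    simp only [List.append_assoc, List.singleton_append]
    congr 1
    simp
    intro t _ b _
    rw [show ((a:Int) + 1 + (t:Int)) = (a:Int) + ((t:Int) + 1) by ring]


theorem pv_fd0 (N x : Nat) (hx : x < N) : PySem.Int.floordiv (x:Int) (N:Int) = 0 := by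
  rw [PySem.Int.floordiv_natCast, Nat.div_eq_of_lt hx]; simp

theorem pv_fd1 (N x : Nat) (hN : 0 < N) (hx : x < N) :
    PySem.Int.floordiv ((N+x : Nat):Int) (N:Int) = 1 := by
  rw [PySem.Int.floordiv_natCast]
  rw [show (N + x) / N = 1 by rw [Nat.add_comm, Nat.add_div_right _ hN, Nat.div_eq_of_lt hx]]
  simp

theorem pv_md (N x : Nat) (hx : x < N) : PySem.Int.mod (x:Int) (N:Int) = (x:Int) := by
  rw [PySem.Int.mod_natCast, Nat.mod_eq_of_lt hx]

theorem pv_md' (N x : Nat) (hx : x < N) : PySem.Int.mod ((N+x : Nat):Int) (N:Int) = (x:Int) := by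
  rw [PySem.Int.mod_natCast, Nat.add_mod_left, Nat.mod_eq_of_lt hx]

theorem pv_msub (N i b : Nat) (hN : 0 < N) (hb : b < N) :
    PySem.Int.mod ((i:Int) - (b:Int)) (N:Int) = (((i + N - b) % N : Nat) : Int) := by
  rw [show ((i:Int) - (b:Int)) = (((i+N-b : Nat)):Int) - (N:Int) by
    rw [Nat.cast_sub (by omega : b ≤ i + N)]; push_cast; ring]
  rw [PySem.Int.mod_eq_emod_of_pos (by exact_mod_cast hN)]
  rw [Int.sub_emod_right, ← Int.natCast_mod]

theorem pv_Q1 (N i b : Nat) (hi : i < N) (hb : b < N) :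
    pvG (N:Int) (i:Int) (b:Int) = ((((i+b) % N : Nat)) : Int) := by
  simp only [pvG, pv_fd0 N i hi, pv_fd0 N b hb, pv_md N i hi, pv_md N b hb,
    add_zero, if_true]
  rw [show PySem.Int.mod 0 2 = 0 by decide]
  rw [show ((i:Int) + (b:Int)) = (((i+b:Nat)):Int) by push_cast; ring, PySem.Int.mod_natCast]
  ring

theorem pv_Q2 (N i b : Nat) (hN : 0 < N) (hi : i < N) (hb : b < N) :
    pvG (N:Int) (i:Int) ((N+b : Nat):Int) = ((((i+b) % N + N : Nat)) : Int) := by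
  simp only [pvG, pv_fd0 N i hi, pv_fd1 N b hN hb, pv_md N i hi, pv_md' N b hb,
    zero_add, if_true]
  rw [show PySem.Int.mod 1 2 = 1 by decide]
  rw [show ((i:Int) + (b:Int)) = (((i+b:Nat)):Int) by push_cast; ring, PySem.Int.mod_natCast]
  push_cast
  ring

theorem pv_Q3 (N i b : Nat) (hN : 0 < N) (hi : i < N) (hb : b < N) :
    pvG (N:Int) ((N+i : Nat):Int) (b:Int) = ((((i + N - b) % N + N : Nat)) : Int) := by
  simp only [pvG, pv_fd1 N i hN hi, pv_fd0 N b hb, pv_md N b hb, pv_md' N i hi, add_zero]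
  rw [if_neg (by norm_num)]
  rw [show PySem.Int.mod 1 2 = 1 by decide]
  rw [pv_msub N i b hN hb]
  push_cast [Nat.cast_sub (by omega : b ≤ i + N)]
  ring

theorem pv_Q4 (N i b : Nat) (hN : 0 < N) (hi : i < N) (hb : b < N) :
    pvG (N:Int) ((N+i : Nat):Int) ((N+b : Nat):Int) = ((((i + N - b) % N : Nat)) : Int) := by
  simp only [pvG, pv_fd1 N i hN hi, pv_fd1 N b hN hb, pv_md' N i hi, pv_md' N b hb]
  rw [if_neg (by norm_num)]
  rw [show PySem.Int.mod (1+1) 2 = 0 by decide]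
  rw [pv_msub N i b hN hb]
  ring

theorem pv_rot_row (N a : Nat) (ha : a < N) :
    (List.range N).drop a ++ (List.range N).take a
      = (List.range N).map (fun b => (a+b) % N) := by
  apply List.ext_getElem
  · simp; omega
  · intro i h1 h2
    simp only [List.getElem_map, List.getElem_range]
    rw [List.getElem_append]
    split
    · rw [List.getElem_drop, List.getElem_range, Nat.mod_eq_of_lt (by simp at *; omega)]
    · rw [List.getElem_take, List.getElem_range]
      have hi : i < N := by simpa using h2
      have hle : N ≤ a + i := by simp at *; omega
      rw [Nat.mod_eq_sub_mod hle, Nat.mod_eq_of_lt (by omega)]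
      simp; omega

theorem pv_rev_full (N a : Nat) (ha : a + 1 = N) :
    (List.range N).reverse = (List.range N).map (fun b => (a + N - b) % N) := by
  apply List.ext_getElem
  · simp
  · intro i h1 h2
    have hi : i < N := by simpa using h2
    simp only [List.getElem_map, List.getElem_range, List.getElem_reverse, List.length_range]
    rw [Nat.mod_eq_sub_mod (by omega), Nat.mod_eq_of_lt (by omega)]
    omega

theorem pv_rev_row (N a : Nat) (ha : a < N) :
    ((List.range N).drop ((a+1) % N) ++ (List.range N).take ((a+1) % N)).reverse
      = (List.range N).map (fun b => (a + N - b) % N) := by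
  rcases Nat.lt_or_ge (a+1) N with h | h
  · rw [Nat.mod_eq_of_lt h]
    apply List.ext_getElem
    · simp; omega
    · intro i h1 h2
      have hi : i < N := by simpa using h2
      simp only [List.getElem_map, List.getElem_range, List.getElem_reverse]
      rw [List.getElem_append]
      split
      · rename_i hcase
        rw [List.getElem_drop, List.getElem_range]
        have hgt : a < i := by
          simp only [List.length_append, List.length_drop, List.length_take,
            List.length_range] at hcase ⊢
          omega
        rw [Nat.mod_eq_of_lt (by omega)]
        simp only [List.length_append, List.length_drop, List.length_take, List.length_range]
        omega
      · rename_i hcase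
        rw [List.getElem_take, List.getElem_range]
        have hle : i ≤ a := by
          simp only [List.length_append, List.length_drop, List.length_take,
            List.length_range, not_lt] at hcase
          omega
        rw [Nat.mod_eq_sub_mod (by omega), Nat.mod_eq_of_lt (by omega)]
        simp only [List.length_append, List.length_drop, List.length_take, List.length_range]
        omega
  · have haN : a + 1 = N := by omega
    rw [show (a+1) % N = 0 by rw [haN, Nat.mod_self]]
    simp only [List.drop_zero, List.take_zero, List.append_nil]
    exact pv_rev_full N a haN

-- the labels expression, shared verbatim by both ports
theorem pv_snd (n : Int) :
    (generate_dihedral_table n).2 = (generate_dihedral_table_alt n).2 := rfl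

theorem pv_A (N : Nat) (hN : 0 < N) :
    (generate_dihedral_table (N:Int)).1
      = (List.range (N+N)).map (fun a : Nat =>
          (List.range (N+N)).map (fun b : Nat => pvG (N:Int) (a:Int) (b:Int))) := by
  have hm : (2 * (N:Int)) = ((N+N : Nat) : Int) := by push_cast; ring
  simp only [generate_dihedral_table, hm, Int.toNat_natCast]
  have htb : ((PySem.List.pyRange 0 ((N+N:Nat):Int) 1).map
      (fun _ => List.replicate (N+N) (0:Int))).length = N+N := by
    simp [PySem.List.length_pyRange_one]; omega
  have hrows : ∀ r ∈ (PySem.List.pyRange 0 ((N+N:Nat):Int) 1).map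
      (fun _ => List.replicate (N+N) (0:Int)), r.length = N+N := by
    intro r hr
    rcases List.mem_map.mp hr with ⟨_, _, rfl⟩
    simp
  have h := pv_outer (pvG ((N:Nat):Int)) (N+N) (N+N) 0
    ((PySem.List.pyRange 0 ((N+N:Nat):Int) 1).map (fun _ => List.replicate (N+N) (0:Int)))
    (by omega) htb hrows
  rw [Nat.cast_zero] at h
  simp only [pvG] at h
  rw [h]
  simp only [List.take_zero, List.nil_append, zero_add, pvG]

theorem pv_B (N : Nat) :
    (generate_dihedral_table_alt (N:Int)).1
      = (List.range N).map (fun a : Nat =>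
            (List.range N).map (fun b : Nat => ((((a+b) % N : Nat)):Int))
          ++ (List.range N).map (fun b : Nat => ((((a+b) % N : Nat)):Int) + (N:Int)))
        ++ (List.range N).map (fun a : Nat =>
            (List.range N).map (fun b : Nat => ((((a + N - b) % N : Nat)):Int) + (N:Int))
          ++ (List.range N).map (fun b : Nat => ((((a + N - b) % N : Nat)):Int))) := by
  simp only [generate_dihedral_table_alt, PySem.List.foldl_append_singleton_eq_map,
    List.nil_append]
  rw [PySem.List.pyRange_zero_nat]
  simp only [List.map_map, Function.comp_def]
  congr 1
  · apply List.map_congr_left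
    intro a ha
    have haN : a < N := List.mem_range.mp ha
    rw [PySem.List.slice_from_natCast, PySem.List.slice_to_natCast]
    rw [← List.map_drop, ← List.map_take, ← List.map_append, pv_rot_row N a haN,
      List.map_map, List.map_map]
    simp [Function.comp_def]
  · apply List.map_congr_left
    intro a ha
    have haN : a < N := List.mem_range.mp ha
    rw [show ((a:Int)+1) = ((a+1:Nat):Int) by push_cast; ring, PySem.Int.mod_natCast]
    rw [PySem.List.slice_from_natCast, PySem.List.slice_to_natCast]
    rw [← List.map_drop, ← List.map_take, ← List.map_append, ← List.map_reverse,
      pv_rev_row N a haN, List.map_map, List.map_map]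
    simp [List.map_map, Function.comp_def]

theorem pv_main (n : Int) : generate_dihedral_table n = generate_dihedral_table_alt n := by
  have hsnd := pv_snd n
  by_cases hn : n ≤ 0
  · refine Prod.ext ?_ hsnd
    have h2n : PySem.List.pyRange 0 (2*n) 1 = [] := PySem.List.pyRange_one_eq_nil (by omega)
    have hn0 : PySem.List.pyRange 0 n 1 = [] := PySem.List.pyRange_one_eq_nil (by omega)
    simp [generate_dihedral_table, generate_dihedral_table_alt, h2n, hn0]
  · have hn' : 0 < n := by omega
    obtain ⟨N, rfl⟩ : ∃ N : Nat, n = ↑N := ⟨n.toNat, (Int.toNat_of_nonneg hn'.le).symm⟩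
    have hN : 0 < N := by exact_mod_cast hn'
    refine Prod.ext ?_ hsnd
    rw [pv_A N hN, pv_B N]
    rw [List.range_add, List.map_append, List.map_map]
    simp only [Function.comp_def]
    congr 1
    · apply List.map_congr_left
      intro a ha
      have haN : a < N := List.mem_range.mp ha
      rw [List.map_append, List.map_map]
      simp only [Function.comp_def]
      congr 1
      · apply List.map_congr_left
        intro b hb
        exact pv_Q1 N a b haN (List.mem_range.mp hb)
      · apply List.map_congr_left
        intro b hb
        rw [pv_Q2 N a b hN haN (List.mem_range.mp hb)]
        push_cast
        ring
    · apply List.map_congr_left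
      intro a ha
      have haN : a < N := List.mem_range.mp ha
      rw [List.map_append, List.map_map]
      simp only [Function.comp_def]
      congr 1
      · apply List.map_congr_left
        intro b hb
        rw [pv_Q3 N a b hN haN (List.mem_range.mp hb)]
        push_cast
        ring
      · apply List.map_congr_left
        intro b hb
        rw [pv_Q4 N a b hN haN (List.mem_range.mp hb)]

-- ===== VERDICT (by name: the statement is the Claim_ definition above) =====
theorem generate_dihedral_table_spec : Claim_equal_generate_dihedral_table := by
  intro n _
  unfold Spec_generate_dihedral_table
  exact pv_main n
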